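-- pv_equiv track=rewrite | github.com/veg/SARS-CoV-2 | python/import-batch.py | process_location
-- ===== SOURCE A (Python) =====
-- def process_location (location):
--     pieces = [k.strip() for k in location.split ('/')]
--     location = {
--         'subregion' : pieces[0],
--         'country' : None,
--         'state' : None,
--         'locality' : None
--     }
--     try:
--         location['country'] = pieces[1]
--         location['state'] = pieces[2]
--         location['locality'] = pieces[3]
--
--     except:
--         pass
--     return location
-- ===== SOURCE B (Python) =====
-- def process_location(location):
--     keys = ('subregion', 'country', 'state', 'locality')
--     vals = [None, None, None, None]
--     i = 0
--     buf = []
--     for ch in location: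
--         if ch == '/':
--             if i < 4:
--                 vals[i] = ''.join(buf).strip()
--             i += 1
--             buf = []
--         else:
--             buf.append(ch)
--     if i < 4:
--         vals[i] = ''.join(buf).strip()
--     return dict(zip(keys, vals))
-- ===== Notes on version B (the rewrite author's own statement) =====
-- stated objective: alternative
-- what changed: Replaces split plus try/except-guarded positional assignments into a dict with a single-pass character state machine that accumulates the current piece in a buffer and, at each separator slash and at end of string, strips and stores it into the next of four value slots (ignoring pieces beyond the fourth), finally zipping the fixed key tuple with the slots.
import Mathlib
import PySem

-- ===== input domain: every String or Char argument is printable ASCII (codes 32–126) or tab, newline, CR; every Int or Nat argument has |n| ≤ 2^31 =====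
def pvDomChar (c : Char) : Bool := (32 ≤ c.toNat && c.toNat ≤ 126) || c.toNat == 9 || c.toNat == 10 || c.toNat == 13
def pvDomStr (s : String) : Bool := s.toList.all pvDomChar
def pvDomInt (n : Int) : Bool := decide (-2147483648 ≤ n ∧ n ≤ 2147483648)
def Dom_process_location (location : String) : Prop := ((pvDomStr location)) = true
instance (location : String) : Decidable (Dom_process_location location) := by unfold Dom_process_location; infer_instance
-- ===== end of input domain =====

-- B replaces A's split('/') + try/except positional assignments by a single-pass character
-- state machine filling four value slots, zipped with the key names (objective: alternative).

-- ===== PORT A =====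
-- location.split('/') (sep ≠ '', so Python's str.split with a separator = Chars.splitOn)
def pvSplitSlash (location : String) : List String :=
  (PySem.Chars.splitOn location.toList ['/']).map String.ofList

def process_location (location : String) : List (String × Option String) :=
  let pieces := (pvSplitSlash location).map (fun k => PySem.Str.strip k)
  -- pieces[0]: IndexError impossible, str.split always yields at least one piece (pv_splitSlash_ne_nil)
  match PySem.List.pyGet? pieces 0 with
  | none => []
  | some p0 =>
    let d : PySem.Dict String (Option String) :=
      PySem.Dict.ofList [("subregion", some p0), ("country", none), ("state", none), ("locality", none)]
    -- try: the three assignments run in order, stopping at the first IndexError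
    let d :=
      match PySem.List.pyGet? pieces 1 with
      | none => d
      | some p1 =>
        let d := d.insert "country" (some p1)
        match PySem.List.pyGet? pieces 2 with
        | none => d
        | some p2 =>
          let d := d.insert "state" (some p2)
          match PySem.List.pyGet? pieces 3 with
          | none => d
          | some p3 => d.insert "locality" (some p3)
    d.items

-- ===== PORT B =====
-- the loop body: on '/' flush the buffer (stripped) into slot i if i < 4 and advance i,
-- otherwise append the character to the buffer
def pvStep (st : List (Option String) × Nat × List Char) (ch : Char) :
    List (Option String) × Nat × List Char :=
  if ch = '/' then
    ((if st.2.1 < 4 then st.1.set st.2.1 (some (PySem.Str.strip (String.ofList st.2.2))) else st.1),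
     st.2.1 + 1, [])
  else (st.1, st.2.1, st.2.2 ++ [ch])

def process_location_alt (location : String) : List (String × Option String) :=
  let keys := ["subregion", "country", "state", "locality"]
  let st := location.toList.foldl pvStep ([none, none, none, none], 0, [])
  -- final flush of the last piece
  let vals := if st.2.1 < 4 then st.1.set st.2.1 (some (PySem.Str.strip (String.ofList st.2.2))) else st.1
  (PySem.Dict.ofList (keys.zip vals)).items

-- ===== PRECONDITION & SPEC =====
def Spec_process_location (location : String) (out : List (String × Option String)) : Prop := out = process_location_alt location
instance (location : String) (out : List (String × Option String)) : Decidable (Spec_process_location location out) := by unfold Spec_process_location; infer_instance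

-- ===== CLAIM (what is proved, stated in full; the proofs are below) =====
def Claim_equal_process_location : Prop := ∀ (location : String), Dom_process_location location → Spec_process_location location (process_location location)

-- ===== LEMMAS AND PROOFS =====

-- simple structural splitting on '/', proved equal to PySem.Chars.splitOn _ ['/']
def pvSp : List Char → List (List Char)
  | [] => [[]]
  | c :: rest =>
    if c = '/' then [] :: pvSp rest
    else (pvSp rest).modifyHead (fun p => c :: p)

theorem pvSp_ne_nil : ∀ l, pvSp l ≠ [] := by
  intro l
  cases l with
  | nil => simp [pvSp]
  | cons c rest =>
    simp only [pvSp]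
    split
    · simp
    · cases h : pvSp rest with
      | nil => exact absurd h (pvSp_ne_nil rest)
      | cons p ps => simp

theorem pv_go_eq : ∀ (l : List Char) (fuel : Nat) (cur : List Char) (acc : List (List Char)),
    l.length < fuel →
    PySem.Chars.splitOn.go ['/'] fuel l cur acc
      = acc.reverse ++ (pvSp l).modifyHead (fun p => cur.reverse ++ p) := by
  intro l
  induction l with
  | nil =>
    intro fuel cur acc h
    match fuel with
    | fuel + 1 => simp [PySem.Chars.splitOn.go, pvSp]
  | cons c rest ih =>
    intro fuel cur acc h
    match fuel with
    | fuel + 1 =>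
      rw [PySem.Chars.splitOn.go]
      by_cases hc : c = '/'
      · subst hc
        rw [if_pos (by simp [List.isPrefixOf])]
        simp only [List.length_singleton, List.drop_one, List.tail_cons]
        rw [ih fuel [] ((cur.reverse) :: acc) (by simp at h; omega)]
        simp [pvSp]
        cases hsp : pvSp rest with
        | nil => exact absurd hsp (pvSp_ne_nil rest)
        | cons p ps => simp
      · have hpf : (['/'].isPrefixOf (c :: rest)) = false := by
          simp [List.isPrefixOf]
          exact fun h' => hc h'.symm
        rw [if_neg (by simp [hpf])]
        rw [ih fuel (c :: cur) acc (by simp at h; omega)]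
        simp only [pvSp, if_neg hc]
        congr 1
        cases hsp : pvSp rest with
        | nil => exact absurd hsp (pvSp_ne_nil rest)
        | cons p ps => simp

theorem pv_splitOn_eq (l : List Char) :
    PySem.Chars.splitOn l ['/'] = pvSp l := by
  unfold PySem.Chars.splitOn
  rw [pv_go_eq l (l.length + 1) [] [] (by omega)]
  cases h : pvSp l with
  | nil => exact absurd h (pvSp_ne_nil l)
  | cons p ps => simp

-- sequential assignment of pieces into slots starting at index i
def pvAsg : List (Option String) → Nat → List (List Char) → List (Option String)
  | vals, _, [] => vals
  | vals, i, p :: ps =>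
      pvAsg (if i < 4 then vals.set i (some (PySem.Str.strip (String.ofList p))) else vals) (i + 1) ps

theorem pvAsg_ge4 : ∀ (ps : List (List Char)) (vals : List (Option String)) (i : Nat),
    4 ≤ i → pvAsg vals i ps = vals := by
  intro ps
  induction ps with
  | nil => intro vals i h; rfl
  | cons p ps ih =>
    intro vals i h
    simp only [pvAsg, if_neg (by omega : ¬ i < 4)]
    exact ih vals (i + 1) (by omega)

-- the flush of the final state
def pvFlush (st : List (Option String) × Nat × List Char) : List (Option String) :=
  if st.2.1 < 4 then st.1.set st.2.1 (some (PySem.Str.strip (String.ofList st.2.2))) else st.1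

-- the scan-plus-flush equals assigning the pieces of (buf ++ l) sequentially
theorem pv_scan_eq : ∀ (l : List Char) (vals : List (Option String)) (i : Nat) (buf : List Char),
    pvFlush (l.foldl pvStep (vals, i, buf))
    = pvAsg vals i ((pvSp l).modifyHead (fun p => buf ++ p)) := by
  intro l
  induction l with
  | nil =>
    intro vals i buf
    simp [pvFlush, pvSp, pvAsg]
  | cons c rest ih =>
    intro vals i buf
    by_cases hc : c = '/'
    · subst hc
      have hstep : pvStep (vals, i, buf) '/' =
          ((if i < 4 then vals.set i (some (PySem.Str.strip (String.ofList buf))) else vals), i + 1, []) := by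
        simp [pvStep]
      rw [List.foldl_cons, hstep, ih]
      cases hsp : pvSp rest with
      | nil => exact absurd hsp (pvSp_ne_nil rest)
      | cons p ps => simp [pvSp, hsp, pvAsg]
    · have hstep : pvStep (vals, i, buf) c = (vals, i, buf ++ [c]) := by
        simp [pvStep, hc]
      rw [List.foldl_cons, hstep, ih]
      cases hsp : pvSp rest with
      | nil => exact absurd hsp (pvSp_ne_nil rest)
      | cons p ps => simp [pvSp, hc, hsp, pvAsg]

theorem pv_get1 {α : Type} (x0 x1 : α) (l : List α) : PySem.List.pyGet? (x0 :: x1 :: l) 1 = some x1 := by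
  have h : (1:Int) = ((1:Nat):Int) := rfl
  rw [h, PySem.List.pyGet?_natCast]; simp

theorem pv_get2 {α : Type} (x0 x1 x2 : α) (l : List α) : PySem.List.pyGet? (x0 :: x1 :: x2 :: l) 2 = some x2 := by
  have h : (2:Int) = ((2:Nat):Int) := rfl
  rw [h, PySem.List.pyGet?_natCast]; simp

theorem pv_get3 {α : Type} (x0 x1 x2 x3 : α) (l : List α) : PySem.List.pyGet? (x0 :: x1 :: x2 :: x3 :: l) 3 = some x3 := by
  have h : (3:Int) = ((3:Nat):Int) := rfl
  rw [h, PySem.List.pyGet?_natCast]; simp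

-- ===== VERDICT (by name: the statement is the Claim_ definition above) =====
theorem process_location_spec : Claim_equal_process_location := by
  intro location _
  have hs := pv_scan_eq location.toList [none, none, none, none] 0 []
  simp only [pvFlush] at hs
  unfold Spec_process_location process_location process_location_alt pvSplitSlash
  rw [pv_splitOn_eq]
  simp only []
  rw [hs]
  cases h : pvSp location.toList with
  | nil => exact absurd h (pvSp_ne_nil location.toList)
  | cons p0 rest =>
    simp only [List.modifyHead_cons, List.nil_append, List.map_cons, List.map_map]
    match rest with
    | [] =>
      simp [PySem.List.pyGet?, PySem.List.pyIdx?, PySem.Dict.ofList, PySem.Dict.insert,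
        PySem.Dict.update, PySem.Dict.empty, pvAsg]
    | [p1] =>
      simp [PySem.List.pyGet?, PySem.List.pyIdx?, PySem.Dict.ofList, PySem.Dict.insert,
        PySem.Dict.update, PySem.Dict.empty, pvAsg]
    | [p1, p2] =>
      simp [PySem.List.pyGet?, PySem.List.pyIdx?, PySem.Dict.ofList, PySem.Dict.insert,
        PySem.Dict.update, PySem.Dict.empty, pvAsg]
    | p1 :: p2 :: p3 :: t =>
      simp [pv_get1, pv_get2, pv_get3, PySem.Dict.ofList, PySem.Dict.insert,
        PySem.Dict.update, PySem.Dict.empty, pvAsg, pvAsg_ge4]
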